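-- pv_equiv track=rewrite | github.com/Lianmc9408/LearningPython | m062division.py | devision
-- ===== SOURCE A (Python) =====
-- from collections import deque
--
-- def devision(a, r):
--     res = []
--     q = deque(range(len(a)))
--     pre = len(a)
--
--     while q:
--         cur = q.popleft()
--         if cur <= pre:
--             res.append([])
--
--         for i in res[-1]:
--             if (cur, i) in r or (i, cur) in r:
--                 q.append(cur)
--                 break
--         else:
--             res[-1].append(cur)
--         pre = cur
--     return res
-- ===== SOURCE B (Python) =====
-- def devision(a, r):
--     res = []
--     remaining = list(range(len(a)))
--     while remaining:
--         group, deferred = [], []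
--         for cur in remaining:
--             if any((cur, i) in r or (i, cur) in r for i in group):
--                 deferred.append(cur)
--             else:
--                 group.append(cur)
--         res.append(group)
--         remaining = deferred
--     return res
-- ===== Notes on version B (the rewrite author's own statement) =====
-- stated objective: simpler
-- what changed: Replaces the single deque with re-queuing and the 'cur <= pre' round-boundary sentinel by an explicit round loop: each pass over the remaining indices splits them into the current group and a deferred list, which becomes the next pass's input.
import Mathlib
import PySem

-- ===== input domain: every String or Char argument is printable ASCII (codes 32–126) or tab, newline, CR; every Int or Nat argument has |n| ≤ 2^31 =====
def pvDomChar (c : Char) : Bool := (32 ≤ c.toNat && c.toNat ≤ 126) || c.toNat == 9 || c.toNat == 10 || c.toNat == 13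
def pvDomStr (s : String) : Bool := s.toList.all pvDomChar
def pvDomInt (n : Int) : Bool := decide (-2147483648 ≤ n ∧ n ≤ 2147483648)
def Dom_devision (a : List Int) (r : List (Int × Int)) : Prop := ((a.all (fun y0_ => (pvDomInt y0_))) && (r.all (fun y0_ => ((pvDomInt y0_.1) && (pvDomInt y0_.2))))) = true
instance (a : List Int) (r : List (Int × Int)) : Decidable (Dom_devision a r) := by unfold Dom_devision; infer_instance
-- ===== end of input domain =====

-- B replaces A's single deque with re-queuing and the 'cur <= pre' sentinel by an explicit
-- round loop (each pass splits the remaining indices into a group and a deferred list): simpler.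


-- ===== PORT A =====
-- the for-i-in-res[-1] loop with break/else: true as soon as a conflicting i is found
def devisionConflictFor (r : List (Int × Int)) (g : List Int) (cur : Int) : Bool :=
  match g with
  | [] => false
  | i :: t =>
    if r.contains (cur, i) || r.contains (i, cur) then true
    else devisionConflictFor r t cur

-- the while loop; fuel only makes the re-queuing loop total (it is proved sufficient below).
-- res.getLastD [] is res[-1]: res is nonempty whenever the loop body runs (cur ≤ pre fires first).
def devisionLoop (r : List (Int × Int)) : Nat → List Int → List (List Int) → Int → List (List Int)
  | _, [], res, _ => res
  | 0, _ :: _, res, _ => res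
  | fuel+1, cur :: q, res, pre =>
    let res' := if cur ≤ pre then res ++ [[]] else res
    let g := res'.getLastD []
    if devisionConflictFor r g cur then
      devisionLoop r fuel (q ++ [cur]) res' cur
    else
      devisionLoop r fuel q (res'.dropLast ++ [g ++ [cur]]) cur

def devision (a : List Int) (r : List (Int × Int)) : List (List Int) :=
  devisionLoop r (a.length * a.length + a.length + 1)
    (PySem.List.pyRange 0 (a.length : Int) 1) [] (a.length : Int)

-- ===== PORT B =====
-- one item of a pass: conflict with the group so far → deferred, else → group
def devisionStep (r : List (Int × Int)) (p : List Int × List Int) (cur : Int) : List Int × List Int :=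
  if p.1.any (fun i => r.contains (cur, i) || r.contains (i, cur)) then (p.1, p.2 ++ [cur])
  else (p.1 ++ [cur], p.2)

-- termination of the round loop: the deferred list of a pass is strictly shorter
theorem devisionStep_snd_len (r : List (Int × Int)) :
    ∀ (l : List Int) (g d : List Int),
      (List.foldl (devisionStep r) (g, d) l).2.length ≤ d.length + l.length := by
  intro l
  induction l with
  | nil => intro g d; simp
  | cons x t ih =>
    intro g d
    simp only [List.foldl_cons, devisionStep]
    split
    · have := ih g (d ++ [x]); simp at this ⊢; omega
    · have := ih (g ++ [x]) d; simp at this ⊢; omega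

def devisionRounds (r : List (Int × Int)) : List Int → List (List Int)
  | [] => []
  | x :: xs =>
    let p := List.foldl (devisionStep r) ([], []) (x :: xs)
    p.1 :: devisionRounds r p.2
termination_by l => l.length
decreasing_by
  simp only [List.foldl_cons, devisionStep, List.any_nil, if_neg Bool.false_ne_true]
  have := devisionStep_snd_len r xs [x] []
  simp at this ⊢; omega

def devision_alt (a : List Int) (r : List (Int × Int)) : List (List Int) :=
  devisionRounds r (PySem.List.pyRange 0 (a.length : Int) 1)

-- ===== PRECONDITION & SPEC =====
def Spec_devision (a : List Int) (r : List (Int × Int)) (out : List (List Int)) : Prop := out = devision_alt a r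
instance (a : List Int) (r : List (Int × Int)) (out : List (List Int)) : Decidable (Spec_devision a r out) := by unfold Spec_devision; infer_instance

-- ===== CLAIM (what is proved, stated in full; the proofs are below) =====
def Claim_equal_devision : Prop := ∀ (a : List Int) (r : List (Int × Int)), Dom_devision a r → Spec_devision a r (devision a r)

-- ===== LEMMAS AND PROOFS =====

theorem devisionConflictFor_eq_any (r : List (Int × Int)) (g : List Int) (cur : Int) :
    devisionConflictFor r g cur = g.any (fun i => r.contains (cur, i) || r.contains (i, cur)) := by
  induction g with
  | nil => rfl
  | cons i t ih =>
    simp only [devisionConflictFor, List.any_cons, ← ih]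
    split <;> simp_all

-- the main invariant: mid-round state of A's loop equals B's pass continuation.
-- rest = unprocessed items of the current round, d = deferred so far, g = current group,
-- acc = the finished groups, pre = the previously popped item.
theorem devisionLoop_eq (r : List (Int × Int)) :
    ∀ (fuel : Nat) (rest d g acc : List _) (pre : Int),
      rest.Pairwise (· < ·) → d.Pairwise (· < ·) →
      (∀ y ∈ rest, pre < y) → (∀ y ∈ d, y ≤ pre) →
      (∀ y ∈ d, ∀ z ∈ rest, y < z) →
      rest.length + (rest.length + d.length) * (rest.length + d.length) ≤ fuel →
      devisionLoop r fuel (rest ++ d) (acc ++ [g]) pre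
        = acc ++ (let p := List.foldl (devisionStep r) (g, d) rest;
                  p.1 :: devisionRounds r p.2) := by
  intro fuel
  induction fuel with
  | zero =>
    intro rest d g acc pre _ _ _ _ _ hfuel
    have hr : rest = [] := by
      cases rest with
      | nil => rfl
      | cons x t => exfalso; simp at hfuel
    have hd : d = [] := by
      subst hr
      cases d with
      | nil => rfl
      | cons x t => exfalso; simp at hfuel
    subst hr; subst hd
    simp [devisionLoop, devisionRounds]
  | succ f ih =>
    intro rest d g acc pre hp1 hp2 hlt hle hdr hfuel
    cases rest with
    | nil =>
      cases d with
      | nil => simp [devisionLoop, devisionRounds]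
      | cons x d2 =>
        have hx : x ≤ pre := hle x (by simp)
        simp only [List.nil_append, devisionLoop, if_pos hx]
        rw [show acc ++ [g] ++ [[]] = (acc ++ [g]) ++ [([] : List Int)] by simp]
        rw [List.getLastD_concat, List.dropLast_concat]
        rw [show devisionConflictFor r [] x = false from rfl]
        simp only [Bool.false_eq_true, if_false, List.nil_append]
        have hfe : d2.length + (d2.length + 0) * (d2.length + 0) ≤ f := by
          simp only [List.length_nil, List.length_cons, Nat.zero_add] at hfuel
          rw [show (d2.length + 1) * (d2.length + 1)
                = d2.length * d2.length + 2 * d2.length + 1 by ring] at hfuel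
          rw [show (d2.length + 0) * (d2.length + 0) = d2.length * d2.length by ring]
          omega
        have hd2lt : ∀ y ∈ d2, x < y := fun y hy => List.rel_of_pairwise_cons hp2 hy
        have hrec := ih d2 [] [x] (acc ++ [g]) x
          (List.Pairwise.of_cons hp2) (by simp) hd2lt (by simp) (by simp) hfe
        rw [show d2 ++ ([] : List Int) = d2 by simp] at hrec
        rw [hrec]
        rw [show List.foldl (devisionStep r) (g, x :: d2) [] = (g, x :: d2) from rfl]
        conv_rhs => rw [devisionRounds]
        rw [show List.foldl (devisionStep r) ([], []) (x :: d2)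
              = List.foldl (devisionStep r) ([x], []) d2 from rfl]
        simp
    | cons x rest' =>
      have hx : ¬ x ≤ pre := by have := hlt x (by simp); omega
      simp only [List.cons_append, devisionLoop, if_neg hx]
      rw [List.getLastD_concat, List.dropLast_concat, devisionConflictFor_eq_any]
      have hxrest : ∀ y ∈ rest', x < y := fun y hy => List.rel_of_pairwise_cons hp1 hy
      by_cases hc : (g.any (fun i => r.contains (x, i) || r.contains (i, x))) = true
      · rw [if_pos hc]
        have hdx : (d ++ [x]).Pairwise (· < ·) := by
          rw [List.pairwise_append]
          refine ⟨hp2, by simp, ?_⟩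
          intro y hy z hz
          simp only [List.mem_singleton] at hz
          rw [hz]
          exact hdr y hy x (by simp)
        have hle' : ∀ y ∈ d ++ [x], y ≤ x := by
          intro y hy
          rcases List.mem_append.mp hy with h | h
          · exact le_of_lt (hdr y h x (by simp))
          · simp only [List.mem_singleton] at h; omega
        have hdr' : ∀ y ∈ d ++ [x], ∀ z ∈ rest', y < z := by
          intro y hy z hz
          rcases List.mem_append.mp hy with h | h
          · exact hdr y h z (by simp [hz])
          · simp only [List.mem_singleton] at h; subst h; exact hxrest z hz
        have hfe : rest'.length + (rest'.length + (d ++ [x]).length) * (rest'.length + (d ++ [x]).length) ≤ f := by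
          have heq : rest'.length + (d ++ [x]).length = (x :: rest').length + d.length := by
            simp; omega
          rw [heq]
          simp only [List.length_cons] at hfuel ⊢
          omega
        have hrec := ih rest' (d ++ [x]) g acc x (List.Pairwise.of_cons hp1) hdx hxrest hle' hdr' hfe
        rw [List.append_assoc]
        rw [hrec]
        conv_rhs => rw [List.foldl_cons]
        rw [show devisionStep r (g, d) x = (g, d ++ [x]) by
          simp only [devisionStep]; rw [if_pos hc]]
      · rw [if_neg hc]
        have hfe : rest'.length + (rest'.length + d.length) * (rest'.length + d.length) ≤ f := by
          have h1 : (rest'.length + d.length) * (rest'.length + d.length)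
              ≤ ((x :: rest').length + d.length) * ((x :: rest').length + d.length) :=
            Nat.mul_le_mul (by simp only [List.length_cons]; omega) (by simp only [List.length_cons]; omega)
          simp only [List.length_cons] at hfuel h1 ⊢
          omega
        have hrec := ih rest' d (g ++ [x]) acc x (List.Pairwise.of_cons hp1) hp2 hxrest
          (fun y hy => le_of_lt (hdr y hy x (by simp)))
          (fun y hy z hz => hdr y hy z (by simp [hz])) hfe
        rw [hrec]
        conv_rhs => rw [List.foldl_cons]
        rw [show devisionStep r (g, d) x = (g ++ [x], d) by
          simp only [devisionStep]; rw [if_neg hc]]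

theorem devision_eq_alt (a : List Int) (r : List (Int × Int)) :
    devision a r = devision_alt a r := by
  cases a with
  | nil =>
    simp [devision, devision_alt, PySem.List.pyRange_one_eq_nil (by norm_num : (0:Int) ≤ 0),
      devisionLoop, devisionRounds]
  | cons x t =>
    unfold devision devision_alt
    have hn : (0:Int) < (((x :: t).length : Nat) : Int) := by
      simp only [List.length_cons]; push_cast; omega
    rw [PySem.List.pyRange_one_cons hn]
    have hlen : (PySem.List.pyRange (0 + 1) (((x :: t).length : Nat) : Int) 1).length = t.length := by
      rw [PySem.List.length_pyRange_one]
      simp only [List.length_cons]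
      push_cast
      omega
    simp only [devisionLoop, if_pos (le_of_lt hn)]
    have hcf : devisionConflictFor r ((([] : List (List Int)) ++ [[]]).getLastD []) 0 = false := rfl
    rw [hcf]
    simp only [Bool.false_eq_true, if_false]
    have hres : ((([] : List (List Int)) ++ [[]]).dropLast
        ++ [(([] : List (List Int)) ++ [[]]).getLastD [] ++ [0]]) = [[0]] := rfl
    rw [hres]
    have hpw : (PySem.List.pyRange (0 + 1) (((x :: t).length : Nat) : Int) 1).Pairwise (· < ·) :=
      PySem.List.pairwise_lt_pyRange_one _ _
    have hpos : ∀ y ∈ PySem.List.pyRange (0 + 1) (((x :: t).length : Nat) : Int) 1, (0:Int) < y := by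
      intro y hy
      have := (PySem.List.mem_pyRange_one.mp hy).1
      omega
    have hfe : (PySem.List.pyRange (0 + 1) (((x :: t).length : Nat) : Int) 1).length
        + ((PySem.List.pyRange (0 + 1) (((x :: t).length : Nat) : Int) 1).length + ([] : List Int).length)
          * ((PySem.List.pyRange (0 + 1) (((x :: t).length : Nat) : Int) 1).length + ([] : List Int).length)
        ≤ (x :: t).length * (x :: t).length + (x :: t).length := by
      rw [hlen]
      simp only [List.length_nil, List.length_cons, Nat.add_zero]
      rw [show (t.length + 1) * (t.length + 1) = t.length * t.length + 2 * t.length + 1 by ring]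
      omega
    have key := devisionLoop_eq r ((x :: t).length * (x :: t).length + (x :: t).length)
      (PySem.List.pyRange (0 + 1) (((x :: t).length : Nat) : Int) 1) [] [0] [] 0
      hpw (by simp) hpos (by simp) (by simp) hfe
    simp only [List.append_nil, List.nil_append] at key
    rw [key]
    conv_rhs => rw [devisionRounds]
    rw [show List.foldl (devisionStep r) ([], []) (0 :: PySem.List.pyRange (0 + 1) (((x :: t).length : Nat) : Int) 1)
          = List.foldl (devisionStep r) ([0], []) (PySem.List.pyRange (0 + 1) (((x :: t).length : Nat) : Int) 1) from rfl]

-- ===== VERDICT (by name: the statement is the Claim_ definition above) =====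
theorem devision_spec : Claim_equal_devision := by
  intro a r _
  exact devision_eq_alt a r
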